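-- pv_equiv track=rewrite | github.com/confucianzuoyuan/tiger-python | tiger.py | to_nasm
-- ===== SOURCE A (Python) =====
-- def to_nasm(string: str) -> str:
--     result = "'"
--     for c in string:
--         if c == '\n':
--             result += "', 10, '"
--         elif c == '\t':
--             result += "', 9, '"
--         else:
--             result += c
--     result += "'"
--     return result
-- ===== SOURCE B (Python) =====
-- def to_nasm(string: str) -> str:
--     return "'" + string.replace('\n', "', 10, '").replace('\t', "', 9, '") + "'"
-- ===== Notes on version B (the rewrite author's own statement) =====
-- stated objective: idiomatic
-- what changed: Replaces the explicit char-by-char loop with its per-character branch by two chained global str.replace substitutions (safe to chain since the inserted text contains no newline or tab).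
import Mathlib
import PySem

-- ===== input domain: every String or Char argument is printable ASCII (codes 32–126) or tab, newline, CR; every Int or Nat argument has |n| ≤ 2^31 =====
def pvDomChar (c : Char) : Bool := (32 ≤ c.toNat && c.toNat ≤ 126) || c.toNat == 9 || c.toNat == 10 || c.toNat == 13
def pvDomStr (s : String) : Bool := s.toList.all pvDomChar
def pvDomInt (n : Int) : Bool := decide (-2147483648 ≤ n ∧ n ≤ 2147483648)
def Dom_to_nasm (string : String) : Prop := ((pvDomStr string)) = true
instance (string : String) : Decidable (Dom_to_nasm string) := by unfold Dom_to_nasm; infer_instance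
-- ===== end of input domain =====

-- B replaces A's char-by-char loop by two chained global replace substitutions (idiomatic; same result).


-- ===== PORT A =====
-- result = "'"; for c in string: append per-branch; result += "'"
def to_nasm (string : String) : String :=
  String.ofList
    ((string.toList.foldl
        (fun r c =>
          if c = '\n' then r ++ "', 10, '".toList
          else if c = '\t' then r ++ "', 9, '".toList
          else r ++ [c])
        "'".toList) ++ "'".toList)

-- ===== PORT B =====
-- "'" + string.replace('\n', "', 10, '").replace('\t', "', 9, '") + "'"
def to_nasm_alt (string : String) : String :=
  "'" ++ PySem.Str.replace (PySem.Str.replace string "\n" "', 10, '") "\t" "', 9, '" ++ "'"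

-- ===== PRECONDITION & SPEC =====
def Spec_to_nasm (string : String) (out : String) : Prop := out = to_nasm_alt string
instance (string : String) (out : String) : Decidable (Spec_to_nasm string out) := by unfold Spec_to_nasm; infer_instance

-- ===== CLAIM (what is proved, stated in full; the proofs are below) =====
def Claim_equal_to_nasm : Prop := ∀ (string : String), Dom_to_nasm string → Spec_to_nasm string (to_nasm string)

-- ===== LEMMAS AND PROOFS =====

-- replace with a single-character pattern is a per-character flatMap
theorem go_single (c : Char) (new : List Char) :
    ∀ (l : List Char) (fuel : Nat) (acc : List Char), l.length ≤ fuel →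
      PySem.Chars.replace.go [c] new fuel l acc
        = acc.reverse ++ l.flatMap (fun x => if x = c then new else [x]) := by
  intro l
  induction l with
  | nil =>
    intro fuel acc _
    cases fuel <;> simp [PySem.Chars.replace.go]
  | cons x t ih =>
    intro fuel acc h
    cases fuel with
    | zero => simp at h
    | succ f =>
      by_cases hx : x = c
      · subst hx
        simp [PySem.Chars.replace.go, List.isPrefixOf,
          ih f (new.reverse ++ acc) (by simpa using h)]
      · have hp : [c].isPrefixOf (x :: t) = false := by
          simp [List.isPrefixOf]; intro h'; exact hx h'.symm
        simp [PySem.Chars.replace.go, hp, ih f (x :: acc) (by simpa using h), hx]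

theorem replace_single (cs : List Char) (c : Char) (new : List Char) :
    PySem.Chars.replace cs [c] new = cs.flatMap (fun x => if x = c then new else [x]) := by
  simp [PySem.Chars.replace, go_single c new cs cs.length [] le_rfl]

-- A's loop in closed form: the accumulator-appending fold is a flatMap
theorem foldA (f : Char → List Char) :
    ∀ (l : List Char) (init : List Char),
      l.foldl (fun r c => r ++ f c) init = init ++ l.flatMap f := by
  intro l
  induction l with
  | nil => intro init; simp
  | cons x t ih => intro init; simp [List.foldl, ih]

theorem to_nasm_spec : Claim_equal_to_nasm := by
  intro s _
  unfold Spec_to_nasm to_nasm to_nasm_alt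
  apply String.ext
  have hA : (fun (r : List Char) (c : Char) =>
        if c = '\n' then r ++ "', 10, '".toList
        else if c = '\t' then r ++ "', 9, '".toList
        else r ++ [c])
      = fun r c => r ++ (if c = '\n' then "', 10, '".toList
        else if c = '\t' then "', 9, '".toList else [c]) := by
    funext r c
    by_cases h1 : c = '\n' <;> by_cases h2 : c = '\t' <;> simp [h1, h2]
  have e1 : ("\n".toList) = ['\n'] := rfl
  have e2 : ("\t".toList) = ['\t'] := rfl
  simp only [String.toList_append, PySem.Str.toList_replace, hA,
    foldA _ s.toList, e1, e2, replace_single, String.toList_ofList,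
    List.flatMap_assoc]
  congr 2
  apply List.flatMap_congr
  intro c _
  by_cases h1 : c = '\n'
  · subst h1; decide
  · by_cases h2 : c = '\t'
    · subst h2; simp [h1]
    · simp [h1, h2]
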